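-- pv_equiv track=rewrite | github.com/hao-n/crtk | crtk/utilities.py | collapse_opcode
-- ===== SOURCE A (Python) =====
-- def collapse_opcode(opcode_list, collapse):
--     '''
--     Collapse opcodes by certain level.
--
--     input: list of strings, int
--     output: list of strings
--
--     collapse
--     - 0: Count all opcodes including all the PUSH-like, DUP-like and SWAP-like ones.
--     - 1: Collapse all PUSH-like opcodes to PUSH, DUP-like opcodes to DUP, SWAP-like opcodes to SWAP and LOG-like opcode to LOG.
--     - 2: Drop PUSH-like, DUP-like and SWAP-like opcodes, then replace all LOG-like opcodes with LOG.
--     - 3: Drop all PUSH-like, DUP-like, SWAP-like and LOG-like opcodes.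
--     '''
--     collapsed_opcode_list = []
--
--     if collapse == 0:
--         collapsed_opcode_list = opcode_list
--     elif collapse == 1:
--         for opcode in opcode_list:
--             if 'PUSH' in opcode:
--                 collapsed_opcode_list.append('PUSH')
--             elif 'DUP' in opcode:
--                 collapsed_opcode_list.append('DUP')
--             elif 'SWAP' in opcode:
--                 collapsed_opcode_list.append('SWAP')
--             elif 'LOG' in opcode:
--                 collapsed_opcode_list.append('LOG')
--             else:
--                 collapsed_opcode_list.append(opcode)
--     elif collapse == 2:
--         for opcode in opcode_list:
--             if not (('PUSH' in opcode) or ('DUP' in opcode) or ('SWAP' in opcode)):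
--                 if 'LOG' in opcode:
--                     collapsed_opcode_list.append('LOG')
--                 else:
--                     collapsed_opcode_list.append(opcode)
--             else:
--                 pass
--     elif collapse == 3:
--         for opcode in opcode_list:
--             if not (('PUSH' in opcode) or ('DUP' in opcode) or ('SWAP' in opcode) or ('LOG' in opcode)):
--                 collapsed_opcode_list.append(opcode)
--             else:
--                 pass
--     else:
--         raise ValueError('Parameter collapse can only be in [0, 1, 2, 3].')
--
--     return collapsed_opcode_list
-- ===== SOURCE B (Python) =====
-- # Staged decomposition: first canonicalize the whole list (level-1 collapse),
-- # then filter out the banned canonical tags for levels 2/3; objective: simpler.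
--
-- def _canonical(opcode):
--     for tag in ('PUSH', 'DUP', 'SWAP', 'LOG'):
--         if tag in opcode:
--             return tag
--     return opcode
--
--
-- def collapse_opcode(opcode_list, collapse):
--     if collapse == 0:
--         return opcode_list
--     if collapse not in (1, 2, 3):
--         raise ValueError('Parameter collapse can only be in [0, 1, 2, 3].')
--     # stage 1: fully collapse every opcode to its canonical tag
--     canon = [_canonical(op) for op in opcode_list]
--     if collapse == 1:
--         return canon
--     # stage 2: drop banned tags; an opcode canonicalizes to a tag iff it
--     # contains it, so filtering the canonical list is exact
--     banned = ('PUSH', 'DUP', 'SWAP') if collapse == 2 else ('PUSH', 'DUP', 'SWAP', 'LOG')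
--     return [op for op in canon if op not in banned]
-- ===== Notes on version B (the rewrite author's own statement) =====
-- stated objective: simpler
-- what changed: Replaced A's four bespoke single-pass branch loops with two staged passes: a map that fully canonicalizes every opcode (the level-1 collapse) followed, for levels 2/3, by a filter removing the banned canonical tags; correct because an opcode canonicalizes to a tag iff it contains it.
import Mathlib
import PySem

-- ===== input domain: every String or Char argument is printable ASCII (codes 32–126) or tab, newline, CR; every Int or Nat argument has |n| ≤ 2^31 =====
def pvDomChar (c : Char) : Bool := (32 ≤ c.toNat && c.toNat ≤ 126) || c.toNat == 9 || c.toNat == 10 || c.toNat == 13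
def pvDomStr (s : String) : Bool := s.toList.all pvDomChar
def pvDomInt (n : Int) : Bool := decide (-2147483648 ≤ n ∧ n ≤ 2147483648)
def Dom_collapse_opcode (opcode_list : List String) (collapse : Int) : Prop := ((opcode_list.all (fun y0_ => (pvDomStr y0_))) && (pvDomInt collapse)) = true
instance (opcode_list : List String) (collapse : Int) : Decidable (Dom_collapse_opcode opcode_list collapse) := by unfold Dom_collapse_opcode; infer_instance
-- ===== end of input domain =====

-- B replaces A's four bespoke per-level branch loops by two staged passes
-- (canonicalize-all map, then filter out the banned canonical tags); objective: simpler.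

-- ===== PORT A =====
def collapse_opcode (opcode_list : List String) (collapse : Int) : List String :=
  if collapse == 0 then opcode_list
  else if collapse == 1 then
    opcode_list.foldl (fun acc opcode =>
      if PySem.Str.isIn "PUSH" opcode then acc ++ ["PUSH"]
      else if PySem.Str.isIn "DUP" opcode then acc ++ ["DUP"]
      else if PySem.Str.isIn "SWAP" opcode then acc ++ ["SWAP"]
      else if PySem.Str.isIn "LOG" opcode then acc ++ ["LOG"]
      else acc ++ [opcode]) []
  else if collapse == 2 then
    opcode_list.foldl (fun acc opcode =>
      if !(PySem.Str.isIn "PUSH" opcode || PySem.Str.isIn "DUP" opcode || PySem.Str.isIn "SWAP" opcode) then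
        (if PySem.Str.isIn "LOG" opcode then acc ++ ["LOG"] else acc ++ [opcode])
      else acc) []
  else if collapse == 3 then
    opcode_list.foldl (fun acc opcode =>
      if !(PySem.Str.isIn "PUSH" opcode || PySem.Str.isIn "DUP" opcode || PySem.Str.isIn "SWAP" opcode || PySem.Str.isIn "LOG" opcode) then
        acc ++ [opcode]
      else acc) []
  else []  -- A raises ValueError here; excluded by Pre_collapse_opcode

-- ===== PORT B =====
-- _canonical: first tag (in order) contained in the opcode, else the opcode itself.
def pvCanonical (opcode : String) : String :=
  match ["PUSH", "DUP", "SWAP", "LOG"].find? (fun tag => PySem.Str.isIn tag opcode) with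
  | some tag => tag
  | none => opcode

def collapse_opcode_alt (opcode_list : List String) (collapse : Int) : List String :=
  if collapse == 0 then opcode_list
  else if !(collapse == 1 || collapse == 2 || collapse == 3) then []  -- B raises ValueError; excluded by Pre_
  else
    -- stage 1: fully collapse every opcode to its canonical tag
    let canon := opcode_list.map pvCanonical
    if collapse == 1 then canon
    else
      -- stage 2: drop banned canonical tags
      let banned := if collapse == 2 then ["PUSH", "DUP", "SWAP"] else ["PUSH", "DUP", "SWAP", "LOG"]
      canon.filter (fun op => !banned.contains op)

-- ===== PRECONDITION & SPEC =====
-- Pre_ excludes collapse ∉ {0,1,2,3}, on which A raises ValueError (and B raises the same).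
def Pre_collapse_opcode (_opcode_list : List String) (collapse : Int) : Prop :=
  collapse = 0 ∨ collapse = 1 ∨ collapse = 2 ∨ collapse = 3
instance (opcode_list : List String) (collapse : Int) : Decidable (Pre_collapse_opcode opcode_list collapse) := by unfold Pre_collapse_opcode; infer_instance

def pvWitness_collapse_opcode : List String × Int := (["PUSH1", "DUP2", "SWAP3", "LOG0", "ADD"], 2)

def Spec_collapse_opcode (opcode_list : List String) (collapse : Int) (out : List String) : Prop := out = collapse_opcode_alt opcode_list collapse
instance (opcode_list : List String) (collapse : Int) (out : List String) : Decidable (Spec_collapse_opcode opcode_list collapse out) := by unfold Spec_collapse_opcode; infer_instance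

-- ===== CLAIM (what is proved, stated in full; the proofs are below) =====
def Claim_equal_collapse_opcode : Prop := ∀ (opcode_list : List String) (collapse : Int), Dom_collapse_opcode opcode_list collapse → Pre_collapse_opcode opcode_list collapse → Spec_collapse_opcode opcode_list collapse (collapse_opcode opcode_list collapse)

-- ===== LEMMAS AND PROOFS =====

-- If the substring test fails, the string cannot literally be that tag.
theorem ne_of_not_isIn (tag opcode : String) (h : PySem.Str.isIn tag opcode = false) :
    opcode ≠ tag := by
  intro he
  subst he
  have ht : PySem.Str.isIn opcode opcode = true :=
    (PySem.Str.isIn_iff_infix _ _).mpr (List.infix_refl _)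
  rw [h] at ht
  cases ht

-- pvCanonical unfolded to the first-match nested conditional.
theorem pvCanonical_eq (opcode : String) :
    pvCanonical opcode =
      (if PySem.Str.isIn "PUSH" opcode then "PUSH"
       else if PySem.Str.isIn "DUP" opcode then "DUP"
       else if PySem.Str.isIn "SWAP" opcode then "SWAP"
       else if PySem.Str.isIn "LOG" opcode then "LOG"
       else opcode) := by
  simp only [pvCanonical, List.find?]
  cases PySem.Str.isIn "PUSH" opcode <;>
    cases PySem.Str.isIn "DUP" opcode <;>
      cases PySem.Str.isIn "SWAP" opcode <;>
        cases PySem.Str.isIn "LOG" opcode <;>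
          simp

-- A's level-1 loop produces the canonicalized list.
theorem foldl1_eq (l : List String) (acc : List String) :
    l.foldl (fun acc opcode =>
      if PySem.Str.isIn "PUSH" opcode then acc ++ ["PUSH"]
      else if PySem.Str.isIn "DUP" opcode then acc ++ ["DUP"]
      else if PySem.Str.isIn "SWAP" opcode then acc ++ ["SWAP"]
      else if PySem.Str.isIn "LOG" opcode then acc ++ ["LOG"]
      else acc ++ [opcode]) acc = acc ++ l.map pvCanonical := by
  induction l generalizing acc with
  | nil => simp
  | cons o t ih =>
    simp only [List.foldl_cons, List.map_cons]
    rw [ih, pvCanonical_eq]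
    cases hP : PySem.Str.isIn "PUSH" o <;>
      cases hD : PySem.Str.isIn "DUP" o <;>
        cases hS : PySem.Str.isIn "SWAP" o <;>
          cases hL : PySem.Str.isIn "LOG" o <;>
            simp

-- A's level-2 loop = filter (not banned2) of the canonicalized list.
theorem foldl2_eq (l : List String) (acc : List String) :
    l.foldl (fun acc opcode =>
      if !(PySem.Str.isIn "PUSH" opcode || PySem.Str.isIn "DUP" opcode || PySem.Str.isIn "SWAP" opcode) then
        (if PySem.Str.isIn "LOG" opcode then acc ++ ["LOG"] else acc ++ [opcode])
      else acc) acc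
    = acc ++ (l.map pvCanonical).filter (fun op => !(["PUSH", "DUP", "SWAP"] : List String).contains op) := by
  induction l generalizing acc with
  | nil => simp
  | cons o t ih =>
    simp only [List.foldl_cons, List.map_cons, List.filter_cons]
    rw [ih, pvCanonical_eq]
    cases hP : PySem.Str.isIn "PUSH" o <;>
      cases hD : PySem.Str.isIn "DUP" o <;>
        cases hS : PySem.Str.isIn "SWAP" o <;>
          cases hL : PySem.Str.isIn "LOG" o <;>
            simp_all [List.contains_eq_mem, ne_of_not_isIn]

-- A's level-3 loop = filter (not banned3) of the canonicalized list.
theorem foldl3_eq (l : List String) (acc : List String) :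
    l.foldl (fun acc opcode =>
      if !(PySem.Str.isIn "PUSH" opcode || PySem.Str.isIn "DUP" opcode || PySem.Str.isIn "SWAP" opcode || PySem.Str.isIn "LOG" opcode) then
        acc ++ [opcode]
      else acc) acc
    = acc ++ (l.map pvCanonical).filter (fun op => !(["PUSH", "DUP", "SWAP", "LOG"] : List String).contains op) := by
  induction l generalizing acc with
  | nil => simp
  | cons o t ih =>
    simp only [List.foldl_cons, List.map_cons, List.filter_cons]
    rw [ih, pvCanonical_eq]
    cases hP : PySem.Str.isIn "PUSH" o <;>
      cases hD : PySem.Str.isIn "DUP" o <;>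
        cases hS : PySem.Str.isIn "SWAP" o <;>
          cases hL : PySem.Str.isIn "LOG" o <;>
            simp_all [List.contains_eq_mem, ne_of_not_isIn]

-- ===== VERDICT (by name: the statement is the Claim_ definition above) =====
theorem collapse_opcode_spec : Claim_equal_collapse_opcode := by
  intro opcode_list collapse _ hpre
  unfold Spec_collapse_opcode collapse_opcode collapse_opcode_alt
  rcases hpre with h | h | h | h <;> subst h
  · rfl
  · simpa using foldl1_eq opcode_list []
  · simpa using foldl2_eq opcode_list []
  · simpa using foldl3_eq opcode_list []
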